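-- pv_equiv track=rewrite | github.com/sheriby/BusInquiry | BusManager.py | simplyRoute
-- ===== SOURCE A (Python) =====
-- def simplyRoute(route: list):
--     i = 0
--     j = 1
--     while j < len(route):
--         listi = route[i]
--         listj = route[j]
--         if listi == listj:
--             j += 1
--         elif listi != listj:
--             tmp = [x for x in listi if x in listj]
--             if tmp == []:
--                 i = j
--             else:
--                 k = i
--                 while k <= j:
--                     route[k] = tmp
--                     k += 1
--             j += 1
--     return route
-- ===== SOURCE B (Python) =====
-- # Single pass over the segments, keeping the running intersection and a run length,
-- # writing each finished run once.  Returns a new list (A mutates its argument in place).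
-- def simplyRoute(route: list):
--     if not route:
--         return route
--     out = []
--     cur = route[0]
--     count = 1
--     for seg in route[1:]:
--         s = set(seg)
--         tmp = [x for x in cur if x in s]
--         if tmp:
--             cur = tmp
--             count += 1
--         else:
--             out.extend([cur] * count)
--             cur = seg
--             count = 1
--     out.extend([cur] * count)
--     return out
-- ===== Notes on version B (the rewrite author's own statement) =====
-- stated objective: faster
-- what changed: Replaces the in-place while loop that rewrites the whole run route[i..j] on every shrink of the intersection with a single left-to-right pass keeping the running intersection and a run length, emitting each finished run's final value once; membership tested against a set. Return value only: A mutates its argument, B builds a new list.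
import Mathlib
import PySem

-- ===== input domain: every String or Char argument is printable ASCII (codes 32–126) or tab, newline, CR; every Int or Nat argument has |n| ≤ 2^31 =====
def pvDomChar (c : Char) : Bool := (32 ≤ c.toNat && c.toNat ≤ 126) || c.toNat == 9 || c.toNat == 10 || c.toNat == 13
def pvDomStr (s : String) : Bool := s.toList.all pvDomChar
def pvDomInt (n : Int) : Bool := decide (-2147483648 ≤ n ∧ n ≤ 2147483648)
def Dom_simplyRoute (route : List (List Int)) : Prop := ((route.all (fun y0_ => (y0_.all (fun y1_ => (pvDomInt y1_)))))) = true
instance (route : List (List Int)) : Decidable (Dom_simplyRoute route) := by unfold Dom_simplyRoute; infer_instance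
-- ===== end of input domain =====

-- B replaces A's repeated whole-run rewrites with one pass keeping the running intersection
-- and a run length (objective: faster). Return value only: Python A mutates its argument in
-- place, Python B builds a new list.

-- ===== PORT A =====
-- pvWrite: the inner loop "k = i; while k <= j: route[k] = tmp; k += 1";
-- pvLoopA: the outer "while j < len(route)" loop.  route[i] and route[j] are always in
-- range on every reachable state (0 <= i < j < len), so getD's default is never used.
def pvWrite (route : List (List Int)) (k j : Nat) (tmp : List Int) : List (List Int) :=
  if k ≤ j then pvWrite (route.set k tmp) (k + 1) j tmp else route
termination_by j + 1 - k


-- j increases by 1 each iteration and the loop stops at j = len(route) (writes keep the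
-- length), so len(route) steps of fuel always suffice; fuel 0 is never reached with j < len.
def pvLoopA (fuel : Nat) (route : List (List Int)) (i j : Nat) : List (List Int) :=
  match fuel with
  | 0 => route
  | f + 1 =>
    if j < route.length then
      let listi := route.getD i []
      let listj := route.getD j []
      if listi = listj then pvLoopA f route i (j + 1)
      else
        let tmp := listi.filter (fun x => listj.contains x)
        if tmp = [] then pvLoopA f route j (j + 1)
        else pvLoopA f (pvWrite route i j tmp) i (j + 1)
    else route


def simplyRoute (route : List (List Int)) : List (List Int) :=
  pvLoopA route.length route 0 1

-- ===== PORT B =====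
-- the single pass of Source B: out = emitted runs, cur = running intersection, count = run length
def pvLoopB (rest : List (List Int)) (out : List (List Int)) (cur : List Int) (count : Nat) :
    List (List Int) :=
  match rest with
  | [] => out ++ List.replicate count cur
  | seg :: rest' =>
    let s := PySem.Set.ofList seg
    let tmp := cur.filter (fun x => PySem.Set.contains s x)
    if tmp ≠ [] then pvLoopB rest' out tmp (count + 1)
    else pvLoopB rest' (out ++ List.replicate count cur) seg 1


def simplyRoute_alt (route : List (List Int)) : List (List Int) :=
  match route with
  | [] => []
  | h :: t => pvLoopB t [] h 1

-- ===== PRECONDITION & SPEC =====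
def Spec_simplyRoute (route : List (List Int)) (out : List (List Int)) : Prop := out = simplyRoute_alt route
instance (route : List (List Int)) (out : List (List Int)) : Decidable (Spec_simplyRoute route out) := by unfold Spec_simplyRoute; infer_instance

-- ===== CLAIM (what is proved, stated in full; the proofs are below) =====
def Claim_equal_simplyRoute : Prop := ∀ (route : List (List Int)), Dom_simplyRoute route → Spec_simplyRoute route (simplyRoute route)

-- ===== LEMMAS AND PROOFS =====

theorem filter_set_eq (cur seg : List Int) :
    cur.filter (fun x => PySem.Set.contains (PySem.Set.ofList seg) x)
      = cur.filter (fun x => seg.contains x) := by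
  apply List.filter_congr
  intro x _
  simp [PySem.Set.contains_eq_listContains, PySem.Set.mem_ofList]

theorem pvLoopB_out (rest : List (List Int)) (out : List (List Int)) (cur : List Int)
    (count : Nat) : pvLoopB rest out cur count = out ++ pvLoopB rest [] cur count := by
  induction rest generalizing out cur count with
  | nil => simp [pvLoopB]
  | cons seg rest' ih =>
    simp only [pvLoopB]
    split
    · rw [ih]
    · rw [ih, ih ([] ++ List.replicate count cur)]; simp

theorem set_append_len {α : Type} (done : List α) (m v : α) (l : List α) :
    (done ++ m :: l).set done.length v = done ++ v :: l := by
  induction done with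
  | nil => rfl
  | cons a t ih => simp

theorem pvWrite_spec (mid' : List (List Int)) (done : List (List Int)) (m : List Int)
    (rest : List (List Int)) (tmp : List Int) (n : Nat) (hn : n = done.length) :
    pvWrite (done ++ (m :: mid') ++ rest) n (n + mid'.length) tmp
      = done ++ List.replicate (mid'.length + 1) tmp ++ rest := by
  induction mid' generalizing done m n with
  | nil =>
    subst hn
    rw [pvWrite, if_pos (by omega)]
    rw [show done ++ [m] ++ rest = done ++ m :: rest by simp, set_append_len]
    rw [pvWrite, if_neg (by simp)]
    simp
  | cons m' mid'' ih =>
    subst hn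
    rw [pvWrite, if_pos (by simp)]
    rw [show done ++ (m :: m' :: mid'') ++ rest = done ++ m :: (m' :: mid'' ++ rest) by simp,
        set_append_len]
    have ih' := ih (done ++ [tmp]) m' (done.length + 1) (by simp)
    rw [show done ++ tmp :: (m' :: mid'' ++ rest) = (done ++ [tmp]) ++ (m' :: mid'') ++ rest by simp,
        show done.length + (m' :: mid'').length = done.length + 1 + mid''.length by simp; omega,
        ih']
    simp [List.replicate_succ]

theorem getD_run (done : List (List Int)) (cur : List Int) (c : Nat) (rest : List (List Int)) :
    (done ++ List.replicate (c + 1) cur ++ rest).getD done.length [] = cur := by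
  rw [List.replicate_succ]
  induction done with
  | nil => rfl
  | cons a t ih => simp

theorem getD_next (done : List (List Int)) (cur : List Int) (count : Nat) (seg : List Int)
    (rest : List (List Int)) :
    (done ++ List.replicate count cur ++ seg :: rest).getD (done.length + count) [] = seg := by
  rw [show done ++ List.replicate count cur ++ seg :: rest
      = (done ++ List.replicate count cur) ++ seg :: rest by simp,
     show done.length + count = (done ++ List.replicate count cur).length by simp]
  generalize done ++ List.replicate count cur = p
  induction p with
  | nil => rfl
  | cons a t ih => simp

theorem pvLoopB_nil_cur (rest : List (List Int)) (count : Nat) :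
    pvLoopB rest [] ([] : List Int) (count + 1)
      = List.replicate count [] ++ pvLoopB rest [] ([] : List Int) 1 := by
  cases rest with
  | nil =>
    simp only [pvLoopB, List.nil_append]
    rw [List.replicate_succ']
    simp
  | cons seg rest' =>
    simp only [pvLoopB, List.filter_nil, ne_eq, not_true_eq_false, if_false, List.nil_append]
    rw [pvLoopB_out, pvLoopB_out (out := List.replicate 1 []), List.replicate_succ']
    simp

theorem contains_self_filter (cur : List Int) :
    cur.filter (fun x => cur.contains x) = cur := by
  apply List.filter_eq_self.mpr
  intro a ha
  simpa using ha

theorem loop_main (rest : List (List Int)) (done : List (List Int)) (cur : List Int)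
    (c k : Nat) :
    pvLoopA (rest.length + k) (done ++ List.replicate (c + 1) cur ++ rest) done.length
        (done.length + (c + 1))
      = done ++ pvLoopB rest [] cur (c + 1) := by
  induction rest generalizing done cur c with
  | nil =>
    cases k with
    | zero => simp [pvLoopA, pvLoopB]
    | succ k' =>
      rw [show ([] : List (List Int)).length + (k' + 1) = k' + 1 by simp, pvLoopA,
          if_neg (by simp)]
      simp [pvLoopB]
  | cons seg rest' ih =>
    have hlt : done.length + (c + 1)
        < (done ++ List.replicate (c + 1) cur ++ seg :: rest').length := by simp
    rw [show (seg :: rest').length + k = (rest'.length + k) + 1 by simp; omega, pvLoopA,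
        if_pos hlt]
    simp only [getD_run, getD_next]
    simp only [pvLoopB, filter_set_eq]
    by_cases heq : cur = seg
    · subst heq
      rw [if_pos rfl, contains_self_filter]
      have hsplit : done ++ List.replicate (c + 1) cur ++ cur :: rest'
          = done ++ List.replicate (c + 1 + 1) cur ++ rest' := by
        rw [List.replicate_succ' (n := c + 1)]; simp
      have harith : done.length + (c + 1) + 1 = done.length + (c + 1 + 1) := by omega
      rw [hsplit, harith, ih done cur (c + 1)]
      by_cases hc : cur = []
      · subst hc
        rw [if_neg (by simp), pvLoopB_out, pvLoopB_nil_cur]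
        rw [pvLoopB_out (out := [] ++ List.replicate (c + 1) [])]; simp
      · rw [if_pos hc]
    · rw [if_neg heq]
      by_cases htmp : cur.filter (fun x => seg.contains x) = []
      · rw [htmp, if_pos rfl, if_neg (by simp)]
        have hsplit : done ++ List.replicate (c + 1) cur ++ seg :: rest'
            = (done ++ List.replicate (c + 1) cur) ++ List.replicate (0 + 1) seg ++ rest' := by
          simp
        have hj : done.length + (c + 1) = (done ++ List.replicate (c + 1) cur).length := by simp
        rw [hsplit, hj, ih (done ++ List.replicate (c + 1) cur) seg 0]
        rw [pvLoopB_out (out := [] ++ List.replicate (c + 1) cur)]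
        simp
      · rw [if_neg htmp, if_pos htmp]
        have hw := pvWrite_spec (List.replicate c cur ++ [seg]) done cur rest'
          (cur.filter (fun x => seg.contains x)) done.length rfl
        rw [show done ++ List.replicate (c + 1) cur ++ seg :: rest'
              = done ++ (cur :: (List.replicate c cur ++ [seg])) ++ rest' by
            simp [List.replicate_succ],
            show done.length + (c + 1) = done.length + (List.replicate c cur ++ [seg]).length by
            simp,
            hw,
            show (List.replicate c cur ++ [seg]).length + 1 = c + 1 + 1 by simp,
            show done.length + (List.replicate c cur ++ [seg]).length + 1
              = done.length + (c + 1 + 1) by simp; omega,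
            ih done _ (c + 1)]

-- ===== VERDICT (by name: the statement is the Claim_ definition above) =====
theorem simplyRoute_spec : Claim_equal_simplyRoute := by
  intro route _
  unfold Spec_simplyRoute simplyRoute simplyRoute_alt
  cases route with
  | nil => simp [pvLoopA]
  | cons h t =>
    have := loop_main t [] h 0 1
    simpa using this
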